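-- pv_equiv track=rewrite | github.com/koii-network/prometheus-beta | src/max_consecutive_characters_sum.py | max_consecutive_characters_sum
-- ===== SOURCE A (Python) =====
-- def max_consecutive_characters_sum(input_string):
--     """
--     Calculate the maximum sum of consecutive characters that are also consecutive in the input string.
--
--     Args:
--         input_string (str): The input string to analyze
--
--     Returns:
--         int: The maximum sum of consecutive characters
--
--     Raises:
--         TypeError: If input is not a string
--         ValueError: If input string is empty
--     """
--     # Input validation
--     if not isinstance(input_string, str):
--         raise TypeError("Input must be a string")
--
--     if not input_string:
--         raise ValueError("Input string cannot be empty")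
--
--     # Initialize variables
--     max_sum = 0
--     current_sum = 0
--     current_consecutive_chars = input_string[0]
--
--     for i in range(len(input_string)):
--         # If we're at the start or the current character is consecutive to the previous one
--         if (i == 0) or (ord(input_string[i]) == ord(input_string[i-1]) + 1):
--             current_sum += ord(input_string[i])
--             current_consecutive_chars += input_string[i]
--         else:
--             # Reset sum and consecutive characters if not consecutive
--             max_sum = max(max_sum, current_sum)
--             current_sum = ord(input_string[i])
--             current_consecutive_chars = input_string[i]
--
--     # Check the last sequence
--     max_sum = max(max_sum, current_sum)
--
--     return max_sum
-- ===== SOURCE B (Python) =====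
-- def max_consecutive_characters_sum(input_string):
--     if not isinstance(input_string, str):
--         raise TypeError("Input must be a string")
--     if not input_string:
--         raise ValueError("Input string cannot be empty")
--     # Phase 1: partition into maximal runs of ascending-consecutive characters
--     runs = []
--     current = input_string[0]
--     for prev, ch in zip(input_string, input_string[1:]):
--         if ord(ch) == ord(prev) + 1:
--             current += ch
--         else:
--             runs.append(current)
--             current = ch
--     runs.append(current)
--     # Phase 2: reduce each run to its ordinal sum and take the maximum
--     return max(sum(ord(c) for c in run) for run in runs)
-- ===== Notes on version B (the rewrite author's own statement) =====
-- stated objective: alternative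
-- what changed: Replaces A's fused running-accumulator loop (max_sum/current_sum updated in one pass with an i==0 special case) by a two-phase group-then-reduce: first partition the string into maximal ascending-consecutive runs, then map each run to its ordinal sum and take the maximum of those sums.
import Mathlib
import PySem

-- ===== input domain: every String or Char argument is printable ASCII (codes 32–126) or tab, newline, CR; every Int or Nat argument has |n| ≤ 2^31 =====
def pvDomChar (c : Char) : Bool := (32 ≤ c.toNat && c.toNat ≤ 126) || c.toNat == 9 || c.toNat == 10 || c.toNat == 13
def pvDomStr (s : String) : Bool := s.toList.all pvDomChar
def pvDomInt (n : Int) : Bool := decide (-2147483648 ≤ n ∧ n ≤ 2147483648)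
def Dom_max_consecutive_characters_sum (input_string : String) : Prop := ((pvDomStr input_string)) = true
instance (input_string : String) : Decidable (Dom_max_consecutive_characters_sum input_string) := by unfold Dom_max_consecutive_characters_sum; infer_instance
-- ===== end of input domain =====

-- B replaces A's fused running-accumulator loop by a two-phase group-then-reduce
-- (partition into maximal ascending runs, then max over the runs' ordinal sums); same cost, alternative structure.


-- ===== PORT A =====
-- A's loop: state (max_sum, current_sum, current_consecutive_chars), prev = s[i-1]; branches in source order.
def pvLoopA (maxS curS : Int) (chars : List Char) (prev : Char) : List Char → Int
  | [] => max maxS curS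
  | c :: rest =>
    if c.toNat = prev.toNat + 1 then
      pvLoopA maxS (curS + (c.toNat : Int)) (chars ++ [c]) c rest
    else
      pvLoopA (max maxS curS) ((c.toNat : Int)) [c] c rest

def max_consecutive_characters_sum (input_string : String) : Int :=
  match input_string.toList with
  | [] => 0  -- unreachable under Pre_: Python raises ValueError on the empty string
  | c :: rest =>
    -- i = 0 always takes the first branch: current_sum = 0 + ord(s[0]), chars = s[0] + s[0]
    pvLoopA 0 (0 + (c.toNat : Int)) ([c] ++ [c]) c rest

-- ===== PORT B =====
-- Phase 1: partition into maximal ascending-consecutive runs.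
def pvRuns (prev : Char) (cur : List Char) : List Char → List (List Char)
  | [] => [cur]
  | c :: rest =>
    if c.toNat = prev.toNat + 1 then pvRuns c (cur ++ [c]) rest
    else cur :: pvRuns c [c] rest

def pvSumOrd (r : List Char) : Int := (r.map (fun c => (c.toNat : Int))).sum

def max_consecutive_characters_sum_alt (input_string : String) : Int :=
  match input_string.toList with
  | [] => 0  -- unreachable under Pre_: Python raises ValueError on the empty string
  | c :: rest =>
    -- Phase 2: max over the runs' ordinal sums
    match (pvRuns c [c] rest).map pvSumOrd with
    | [] => 0
    | h :: t => t.foldl max h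

-- ===== PRECONDITION & SPEC =====
-- Pre_ excludes exactly the empty string, on which Python A raises ValueError.
def Pre_max_consecutive_characters_sum (input_string : String) : Prop := input_string ≠ ""
instance (input_string : String) : Decidable (Pre_max_consecutive_characters_sum input_string) := by unfold Pre_max_consecutive_characters_sum; infer_instance
def pvWitness_max_consecutive_characters_sum : String := "abc"

def Spec_max_consecutive_characters_sum (input_string : String) (out : Int) : Prop := out = max_consecutive_characters_sum_alt input_string
instance (input_string : String) (out : Int) : Decidable (Spec_max_consecutive_characters_sum input_string out) := by unfold Spec_max_consecutive_characters_sum; infer_instance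

-- ===== CLAIM (what is proved, stated in full; the proofs are below) =====
def Claim_equal_max_consecutive_characters_sum : Prop := ∀ (input_string : String), Dom_max_consecutive_characters_sum input_string → Pre_max_consecutive_characters_sum input_string → Spec_max_consecutive_characters_sum input_string (max_consecutive_characters_sum input_string)

-- ===== LEMMAS AND PROOFS =====

-- the sums of B's runs, computed directly (proof-only helper)
def pvSums (prev : Char) (curS : Int) : List Char → List Int
  | [] => [curS]
  | c :: rest =>
    if c.toNat = prev.toNat + 1 then pvSums c (curS + (c.toNat : Int)) rest
    else curS :: pvSums c ((c.toNat : Int)) rest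

lemma sumOrd_append_singleton (r : List Char) (c : Char) :
    pvSumOrd (r ++ [c]) = pvSumOrd r + (c.toNat : Int) := by
  simp [pvSumOrd]

lemma map_sumOrd_runs (rest : List Char) :
    ∀ (prev : Char) (cur : List Char),
      (pvRuns prev cur rest).map pvSumOrd = pvSums prev (pvSumOrd cur) rest := by
  induction rest with
  | nil => intro prev cur; simp [pvRuns, pvSums]
  | cons c rest ih =>
    intro prev cur
    by_cases h : c.toNat = prev.toNat + 1
    · simp only [pvRuns, pvSums, if_pos h, ih, sumOrd_append_singleton]
    · simp only [pvRuns, pvSums, if_neg h, List.map_cons, ih]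
      simp [pvSumOrd]

lemma loopA_eq_foldl (rest : List Char) :
    ∀ (maxS curS : Int) (chars : List Char) (prev : Char),
      pvLoopA maxS curS chars prev rest = (pvSums prev curS rest).foldl max maxS := by
  induction rest with
  | nil => intro maxS curS chars prev; simp [pvLoopA, pvSums]
  | cons c rest ih =>
    intro maxS curS chars prev
    by_cases h : c.toNat = prev.toNat + 1
    · simp only [pvLoopA, pvSums, if_pos h, ih]
    · simp only [pvLoopA, pvSums, if_neg h, ih, List.foldl]

lemma sums_ne_nil (rest : List Char) :
    ∀ (prev : Char) (curS : Int), pvSums prev curS rest ≠ [] := by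
  induction rest with
  | nil => intro prev curS; simp [pvSums]
  | cons c rest ih =>
    intro prev curS
    by_cases h : c.toNat = prev.toNat + 1
    · simp only [pvSums, if_pos h]; exact ih _ _
    · simp [pvSums, if_neg h]

lemma sums_head_le (rest : List Char) :
    ∀ (prev : Char) (curS x : Int), (pvSums prev curS rest).head? = some x → curS ≤ x := by
  induction rest with
  | nil =>
    intro prev curS x hx
    simp [pvSums] at hx; omega
  | cons c rest ih =>
    intro prev curS x hx
    by_cases h : c.toNat = prev.toNat + 1
    · simp only [pvSums, if_pos h] at hx
      have h1 := ih c (curS + (c.toNat : Int)) x hx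
      have h2 : (0 : Int) ≤ (c.toNat : Int) := by positivity
      omega
    · simp only [pvSums, if_neg h, List.head?_cons, Option.some.injEq] at hx
      omega

-- ===== VERDICT (by name: the statement is the Claim_ definition above) =====
theorem max_consecutive_characters_sum_spec : Claim_equal_max_consecutive_characters_sum := by
  intro s _ hpre
  unfold Spec_max_consecutive_characters_sum
  unfold max_consecutive_characters_sum max_consecutive_characters_sum_alt
  cases hl : s.toList with
  | nil => exact absurd (String.toList_eq_nil_iff.mp hl) hpre
  | cons c rest =>
    have hs : pvSumOrd [c] = (c.toNat : Int) := by simp [pvSumOrd]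
    simp only [loopA_eq_foldl, map_sumOrd_runs, hs, zero_add]
    cases hc : pvSums c ((c.toNat : Int)) rest with
    | nil => exact absurd hc (sums_ne_nil rest c _)
    | cons h t =>
      have hcu : (c.toNat : Int) ≤ h := sums_head_le rest c _ h (by rw [hc]; rfl)
      have h0 : (0 : Int) ≤ h := le_trans (by positivity) hcu
      show List.foldl max 0 (h :: t) = List.foldl max h t
      simp only [List.foldl]
      congr 1
      omega
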